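-- pv_equiv track=rewrite | github.com/madisonscott/advent-of-code | 2023/13.py | find_mirror_location
-- ===== SOURCE A (Python) =====
-- def find_mirror_location(lines):
--     for i in range(len(lines) - 1):
--         # Check if right neighbor is equivalent
--         if (lines[i] != lines[i + 1]):
--             continue
--
--         #If it is, confirm that the rest of the lines are equal
--         before_width = i + 1
--         mirrored_width = min(before_width, len(lines) - before_width)
--
--         before_start = i - mirrored_width + 1
--         after_start = before_start + mirrored_width
--         before = lines[before_start:after_start]
--         after = lines[after_start:after_start + mirrored_width]
--
--         if before == after[::-1]:
--             return before_width
--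
--     return None
-- ===== SOURCE B (Python) =====
-- def find_mirror_location(lines):
--     # Manacher (even centers) over the line sequence: compute the mirror radius
--     # at each gap in O(n) line comparisons, return the first gap whose radius
--     # reaches an edge of the list.
--     n = len(lines)
--     d = [0] * (n + 1)
--     l, r = 0, 0
--     for g in range(1, n):
--         k = 0
--         if g < r:
--             k = min(d[l + r - g], r - g)
--         while k < g and g + k < n and lines[g - k - 1] == lines[g + k]:
--             k += 1
--         d[g] = k
--         if r < g + k:
--             l, r = g - k, g + k
--         if k == min(g, n - g):
--             return g
--     return None
-- ===== Notes on version B (the rewrite author's own statement) =====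
-- stated objective: faster
-- what changed: B replaces A's per-axis slice/reverse palindrome test by Manacher's algorithm over even centers: it maintains a rightmost mirror window and a radius table so each gap's mirror radius is seeded from its mirror gap, and returns the first gap whose radius reaches an edge; total line comparisons drop from O(n^2) to O(n).
import Mathlib
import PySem

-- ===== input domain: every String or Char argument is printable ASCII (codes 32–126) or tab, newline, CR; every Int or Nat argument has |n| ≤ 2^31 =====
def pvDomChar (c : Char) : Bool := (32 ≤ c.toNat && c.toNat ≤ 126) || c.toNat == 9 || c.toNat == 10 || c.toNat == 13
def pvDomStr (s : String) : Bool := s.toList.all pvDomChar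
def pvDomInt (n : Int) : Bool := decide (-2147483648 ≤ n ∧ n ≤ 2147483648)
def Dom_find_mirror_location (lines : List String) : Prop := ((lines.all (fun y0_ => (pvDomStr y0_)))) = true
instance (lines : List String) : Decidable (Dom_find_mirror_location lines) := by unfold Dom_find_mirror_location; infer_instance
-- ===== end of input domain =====

-- B replaces A's per-axis slice-and-reverse test by Manacher's algorithm over even
-- centers (mirror radii computed with a reusable window), returning the first gap
-- whose radius reaches an edge of the list.

-- ===== PORT A =====
def pvCheckA (lines : List String) (i : Int) : Bool :=
  let before_width := i + 1
  let mirrored_width := min before_width ((lines.length : Int) - before_width)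
  let before_start := i - mirrored_width + 1
  let after_start := before_start + mirrored_width
  let before := PySem.List.slice lines (some before_start) (some after_start)
  let after := PySem.List.slice lines (some after_start) (some (after_start + mirrored_width))
  before == after.reverse

def pvLoopA (lines : List String) : List Int → Option Int
  | [] => none
  | i :: rest =>
    if PySem.List.pyGet? lines i ≠ PySem.List.pyGet? lines (i + 1) then
      pvLoopA lines rest
    else if pvCheckA lines i then some (i + 1)
    else pvLoopA lines rest

def find_mirror_location (lines : List String) : Option Int :=
  pvLoopA lines (PySem.List.pyRange 0 ((lines.length : Int) - 1) 1)

-- ===== PORT B =====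
-- Transliteration of Source B (Manacher, even centers). Python's nonnegative loop
-- variables g, k, l, r and the entries of d are kept as Nat; list indexing in
-- the while-condition is guarded by `k < g ∧ g + k < n`, so `·[·]?` is exact.
def pvExpand (a : List String) (g k : Nat) : Nat :=
  if h : k < g ∧ g + k < a.length ∧ a[g - k - 1]? = a[g + k]? then
    pvExpand a g (k + 1)
  else k
termination_by g - k
decreasing_by omega

def pvManLoop (a : List String) (d : List Nat) (l r g : Nat) : Option Int :=
  if hg : g < a.length then
    let k0 := if g < r then min (d.getD (l + r - g) 0) (r - g) else 0
    let k := pvExpand a g k0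
    let d' := d.set g k
    let l' := if r < g + k then g - k else l
    let r' := if r < g + k then g + k else r
    if k = min g (a.length - g) then some (g : Int)
    else pvManLoop a d' l' r' (g + 1)
  else none
termination_by a.length - g
decreasing_by omega

def find_mirror_location_alt (lines : List String) : Option Int :=
  pvManLoop lines (List.replicate (lines.length + 1) 0) 0 0 1

-- ===== PRECONDITION & SPEC =====
def Spec_find_mirror_location (lines : List String) (out : Option Int) : Prop := out = find_mirror_location_alt lines
instance (lines : List String) (out : Option Int) : Decidable (Spec_find_mirror_location lines out) := by unfold Spec_find_mirror_location; infer_instance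

-- ===== CLAIM (what is proved, stated in full; the proofs are below) =====
def Claim_equal_find_mirror_location : Prop := ∀ (lines : List String), Dom_find_mirror_location lines → Spec_find_mirror_location lines (find_mirror_location lines)

-- ===== LEMMAS AND PROOFS =====

-- the capped mirror radius bound at gap g, and the pointwise mirror condition
abbrev pvCap (a : List String) (g : Nat) : Nat := min g (a.length - g)
abbrev pvMatch (a : List String) (g j : Nat) : Prop := a[g - 1 - j]? = a[g + j]?

def pvGood (a : List String) (g k : Nat) : Prop := k ≤ pvCap a g ∧ ∀ j < k, pvMatch a g j
def pvIsRad (a : List String) (g k : Nat) : Prop := pvGood a g k ∧ (k = pvCap a g ∨ ¬ pvMatch a g k)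

-- reference scan: first gap g whose mirror condition holds fully
def pvScan (a : List String) (g : Nat) : Option Int :=
  if g < a.length then
    if ∀ j < pvCap a g, pvMatch a g j then some (g : Int) else pvScan a (g + 1)
  else none
termination_by a.length - g
decreasing_by omega

-- window invariant for Manacher: [l, r) is a mirror window around a center c ≤ g
def pvWinInv (a : List String) (l r g : Nat) : Prop :=
  ∃ c k, l = c - k ∧ r = c + k ∧ k ≤ c ∧ c + k ≤ a.length ∧ c ≤ g ∧ ∀ j < k, pvMatch a c j

lemma pvIsRad_unique {a : List String} {g k k' : Nat}
    (h : pvIsRad a g k) (h' : pvIsRad a g k') : k = k' := by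
  obtain ⟨⟨hk, hm⟩, hs⟩ := h
  obtain ⟨⟨hk', hm'⟩, hs'⟩ := h'
  by_contra hne
  rcases Nat.lt_or_ge k k' with hlt | hge
  · rcases hs with he | hmm
    · omega
    · exact hmm (hm' k hlt)
  · have hlt : k' < k := by omega
    rcases hs' with he | hmm
    · omega
    · exact hmm (hm k' hlt)

lemma pvExpand_isRad (a : List String) (g : Nat) (hg : g < a.length) :
    ∀ m k, pvCap a g - k ≤ m → pvGood a g k → pvIsRad a g (pvExpand a g k) := by
  intro m
  induction m with
  | zero =>
    intro k hm ⟨hk, hmm⟩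
    have hke : k = pvCap a g := by omega
    rw [pvExpand]
    rw [dif_neg (by
      rintro ⟨h1, h2, _⟩
      simp only [pvCap] at hke; omega)]
    exact ⟨⟨hk, hmm⟩, Or.inl hke⟩
  | succ m ih =>
    intro k hm ⟨hk, hmm⟩
    rw [pvExpand]
    by_cases hc : k < g ∧ g + k < a.length ∧ a[g - k - 1]? = a[g + k]?
    · rw [dif_pos hc]
      have hmt : pvMatch a g k := by
        show a[g - 1 - k]? = a[g + k]?
        rw [show g - 1 - k = g - k - 1 from by omega]; exact hc.2.2
      refine ih (k + 1) (by simp only [pvCap] at *; omega) ⟨by simp only [pvCap] at *; omega, ?_⟩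
      intro j hj
      rcases Nat.lt_or_ge j k with h | h
      · exact hmm j h
      · have : j = k := by omega
        subst this; exact hmt
    · rw [dif_neg hc]
      refine ⟨⟨hk, hmm⟩, ?_⟩
      rcases Nat.lt_or_ge k (pvCap a g) with hlt | hge
      · right
        intro hmt
        exact hc ⟨by simp only [pvCap] at hlt; omega, by simp only [pvCap] at hlt; omega,
          by rw [show g - k - 1 = g - 1 - k from by omega]; exact hmt⟩
      · left; omega

-- the mirror lower bound: inside a valid window, min (d[mirror]) (r - g) is a valid start
lemma pvLowerBound (a : List String) (d : List Nat) (l r g : Nat)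
    (hw : pvWinInv a l r g)
    (hd1 : ∀ h < g, pvIsRad a h (d.getD h 0))
    (hd2 : ∀ h, g ≤ h → d.getD h 0 = 0)
    (hgr : g < r) :
    pvGood a g (min (d.getD (l + r - g) 0) (r - g)) := by
  obtain ⟨c, k, hl, hr, hkc, hcn, hcg, pal⟩ := hw
  have hlr : l + r = 2 * c := by omega
  by_cases hmg : l + r - g = g
  · have : c = g := by omega
    rw [hmg, hd2 g (le_refl g)]
    exact ⟨by omega, by omega⟩
  · set m := l + r - g with hm
    have hmlt : m < g := by omega
    obtain ⟨⟨hkm, mir⟩, _⟩ := hd1 m hmlt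
    simp only [pvCap] at hkm
    set km := d.getD m 0 with hkmdef
    constructor
    · simp only [pvCap]; omega
    · intro j hj
      have hj1 : j < km := by omega
      have hj2 : j < r - g := by omega
      have hjm : j < m := by omega
      have hjg : j < g := by omega
      -- a[g+j]? = a[m-1-j]?  (big palindrome, right arm)
      have t1lt : g + j - c < k := by omega
      have e1 : c + (g + j - c) = g + j := by omega
      have e2 : c - 1 - (g + j - c) = m - 1 - j := by omega
      have s1 : a[g + j]? = a[m - 1 - j]? := by
        have := pal (g + j - c) t1lt
        simp only [pvMatch] at this
        rw [e1, e2] at this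
        exact this.symm
      -- a[g-1-j]? = a[m+j]?  (big palindrome, both arms)
      have s2 : a[g - 1 - j]? = a[m + j]? := by
        by_cases hcj : c + j < g
        · have tlt : g - 1 - j - c < k := by omega
          have f1 : c + (g - 1 - j - c) = g - 1 - j := by omega
          have f2 : c - 1 - (g - 1 - j - c) = m + j := by omega
          have := pal (g - 1 - j - c) tlt
          simp only [pvMatch] at this
          rw [f1, f2] at this
          exact this.symm
        · have tlt : c - 1 - (g - 1 - j) < k := by omega
          have f1 : c - 1 - (c - 1 - (g - 1 - j)) = g - 1 - j := by omega
          have f2 : c + (c - 1 - (g - 1 - j)) = m + j := by omega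
          have := pal (c - 1 - (g - 1 - j)) tlt
          simp only [pvMatch] at this
          rw [f1, f2] at this
          exact this
      -- small palindrome at the mirror gap
      have s3 : a[m - 1 - j]? = a[m + j]? := mir j hj1
      show a[g - 1 - j]? = a[g + j]?
      rw [s1, s2, s3]

lemma pvManLoop_eq_scan (a : List String) :
    ∀ m d l r g, a.length - g ≤ m → 1 ≤ g →
      (∀ h < g, pvIsRad a h (d.getD h 0)) →
      (∀ h, g ≤ h → d.getD h 0 = 0) →
      d.length = a.length + 1 →
      pvWinInv a l r g →
      pvManLoop a d l r g = pvScan a g := by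
  intro m
  induction m with
  | zero =>
    intro d l r g hm _ _ _ _ _
    have hg : ¬ g < a.length := by omega
    rw [pvManLoop, dif_neg hg, pvScan, if_neg hg]
  | succ m ih =>
    intro d l r g hm hg1 hd1 hd2 hlen hw
    by_cases hg : g < a.length
    · have hk0 : pvGood a g (if g < r then min (d.getD (l + r - g) 0) (r - g) else 0) := by
        split_ifs with h
        · exact pvLowerBound a d l r g hw hd1 hd2 h
        · exact ⟨Nat.zero_le _, fun j hj => absurd hj (by omega)⟩
      have hrad : pvIsRad a g (pvExpand a g (if g < r then min (d.getD (l + r - g) 0) (r - g) else 0)) :=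
        pvExpand_isRad a g hg (pvCap a g) _ (by omega) hk0
      set k := pvExpand a g (if g < r then min (d.getD (l + r - g) 0) (r - g) else 0) with hkdef
      have hiff : k = min g (a.length - g) ↔ ∀ j < pvCap a g, pvMatch a g j := by
        constructor
        · intro he j hj
          exact hrad.1.2 j (by simp only [pvCap] at *; omega)
        · intro hall
          exact pvIsRad_unique hrad ⟨⟨le_refl _, hall⟩, Or.inl rfl⟩
      rw [pvManLoop, dif_pos hg, pvScan, if_pos hg]
      simp only [← hkdef]
      by_cases hfull : ∀ j < pvCap a g, pvMatch a g j
      · rw [if_pos hfull, if_pos (hiff.mpr hfull)]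
      · rw [if_neg hfull, if_neg (fun h => hfull (hiff.mp h))]
        have hkcap := hrad.1.1
        simp only [pvCap] at hkcap
        apply ih
        · omega
        · omega
        · intro h hh
          rcases Nat.lt_or_ge h g with hlt | hge
          · rw [List.getD_eq_getElem?_getD, List.getElem?_set_ne (by omega),
              ← List.getD_eq_getElem?_getD]
            exact hd1 h hlt
          · have : h = g := by omega
            subst this
            rw [List.getD_eq_getElem?_getD, List.getElem?_set_self (by omega),
              Option.getD_some]
            exact hrad
        · intro h hh
          rw [List.getD_eq_getElem?_getD, List.getElem?_set_ne (by omega),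
            ← List.getD_eq_getElem?_getD]
          exact hd2 h (by omega)
        · rw [List.length_set]; exact hlen
        · by_cases hwin : r < g + k
          · rw [if_pos hwin, if_pos hwin]
            exact ⟨g, k, rfl, rfl, by omega, by omega, by omega, hrad.1.2⟩
          · rw [if_neg hwin, if_neg hwin]
            obtain ⟨c, k', h1, h2, h3, h4, h5, h6⟩ := hw
            exact ⟨c, k', h1, h2, h3, h4, by omega, h6⟩
    · rw [pvManLoop, dif_neg hg, pvScan, if_neg hg]

-- ===== A-side lemmas (slice palindrome ⟺ pointwise mirror) =====

lemma pv_mirror_iff (l : List String) (w m : Nat) (hw : m ≤ w) (hn : w + m ≤ l.length) :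
    ((l.drop (w - m)).take m = ((l.drop w).take m).reverse ↔
      ∀ k, k < m → l[w - 1 - k]? = l[w + k]?) := by
  have lenB : ((l.drop (w - m)).take m).length = m := by
    simp only [List.length_take, List.length_drop]; omega
  have lenA : ((l.drop w).take m).length = m := by
    simp only [List.length_take, List.length_drop]; omega
  constructor
  · intro h k hk
    have hcongr := congrArg (fun t => t[m - 1 - k]?) h
    simp only [] at hcongr
    rw [List.getElem?_take, if_pos (by omega : m - 1 - k < m), List.getElem?_drop] at hcongr
    rw [List.getElem?_reverse (by omega : m - 1 - k < ((l.drop w).take m).length)] at hcongr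
    rw [lenA] at hcongr
    rw [List.getElem?_take, if_pos (by omega : m - 1 - (m - 1 - k) < m), List.getElem?_drop] at hcongr
    rw [show w - m + (m - 1 - k) = w - 1 - k from by omega,
        show w + (m - 1 - (m - 1 - k)) = w + k from by omega] at hcongr
    exact hcongr
  · intro h
    apply List.ext_getElem?
    intro j
    by_cases hj : j < m
    · rw [List.getElem?_take, if_pos hj, List.getElem?_drop]
      rw [List.getElem?_reverse (by omega : j < ((l.drop w).take m).length)]
      rw [lenA, List.getElem?_take, if_pos (by omega : m - 1 - j < m), List.getElem?_drop]
      rw [show w - m + j = w - 1 - (m - 1 - j) from by omega]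
      exact h (m - 1 - j) (by omega)
    · rw [List.getElem?_eq_none (by omega : ((l.drop (w - m)).take m).length ≤ j),
          List.getElem?_eq_none (by simp only [List.length_reverse, lenA]; omega)]

lemma pv_checkA_prop (lines : List String) (i : Nat) (hi : i + 1 < lines.length) :
    pvCheckA lines (i : Int) = true ↔
      (lines.drop (i + 1 - min (i + 1) (lines.length - (i + 1)))).take (min (i + 1) (lines.length - (i + 1))) =
        ((lines.drop (i + 1)).take (min (i + 1) (lines.length - (i + 1)))).reverse := by
  have hm : min ((i : Int) + 1) ((lines.length : Int) - ((i : Int) + 1)) =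
      ((min (i + 1) (lines.length - (i + 1)) : Nat) : Int) := by omega
  unfold pvCheckA
  dsimp only
  rw [hm]
  have e1 : (i : Int) - ((min (i + 1) (lines.length - (i + 1)) : Nat) : Int) + 1 =
      ((i + 1 - min (i + 1) (lines.length - (i + 1)) : Nat) : Int) := by omega
  rw [e1]
  have e2 : ((i + 1 - min (i + 1) (lines.length - (i + 1)) : Nat) : Int) +
      ((min (i + 1) (lines.length - (i + 1)) : Nat) : Int) = ((i + 1 : Nat) : Int) := by omega
  rw [e2]
  rw [PySem.List.slice_natCast, PySem.List.slice_natCast_add]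
  rw [show (i + 1) - (i + 1 - min (i + 1) (lines.length - (i + 1))) =
      min (i + 1) (lines.length - (i + 1)) from by omega]
  rw [beq_iff_eq]

-- A's full step test (neighbour guard + slice palindrome) ⟺ the full mirror condition at gap i+1
lemma pv_stepA (lines : List String) (i : Nat) (hi : i + 1 < lines.length) :
    (((PySem.List.pyGet? lines (i : Int) == PySem.List.pyGet? lines ((i : Int) + 1)) &&
      pvCheckA lines (i : Int)) = true) ↔
      ∀ k < pvCap lines (i + 1), pvMatch lines (i + 1) k := by
  simp only [Bool.and_eq_true, beq_iff_eq]
  rw [pv_checkA_prop lines i hi,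
    pv_mirror_iff lines (i + 1) (min (i + 1) (lines.length - (i + 1))) (by omega) (by omega)]
  simp only [pvCap, pvMatch]
  constructor
  · exact fun h => h.2
  · intro h
    refine ⟨?_, h⟩
    have h0 := h 0 (by omega)
    simp only [Nat.sub_zero, Nat.add_zero] at h0
    rw [show ((i : Int) + 1) = ((i + 1 : Nat) : Int) from by omega,
      show (i : Int) = ((i : Nat) : Int) from rfl,
      PySem.List.pyGet?_natCast, PySem.List.pyGet?_natCast]
    simpa using h0

lemma pvLoopA_eq_scan (lines : List String) :
    ∀ cnt i0, i0 + 1 + cnt = lines.length →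
      pvLoopA lines ((List.range' i0 cnt).map (fun i : Nat => (i : Int))) = pvScan lines (i0 + 1) := by
  intro cnt
  induction cnt with
  | zero =>
    intro i0 hlen
    rw [pvScan, if_neg (by omega)]
    rfl
  | succ cnt ih =>
    intro i0 hlen
    have hi : i0 + 1 < lines.length := by omega
    have key := pv_stepA lines i0 hi
    rw [List.range'_succ, List.map_cons, pvScan, if_pos (by omega : i0 + 1 < lines.length)]
    simp only [pvLoopA]
    by_cases hfull : ∀ k < pvCap lines (i0 + 1), pvMatch lines (i0 + 1) k
    · obtain ⟨heq, hca⟩ := Bool.and_eq_true_iff.mp (key.mpr hfull)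
      rw [if_neg (not_not_intro (beq_iff_eq.mp heq)), if_pos hca, if_pos hfull]
      rw [show ((i0 : Int) + 1) = ((i0 + 1 : Nat) : Int) from by omega]
    · rw [if_neg hfull]
      by_cases heq : PySem.List.pyGet? lines (i0 : Int) = PySem.List.pyGet? lines ((i0 : Int) + 1)
      · have hca : pvCheckA lines (i0 : Int) = false := by
          by_contra hcc
          exact hfull (key.mp (by
            rw [Bool.and_eq_true, beq_iff_eq]
            exact ⟨heq, by revert hcc; cases pvCheckA lines (i0 : Int) <;> simp⟩))
        rw [if_neg (not_not_intro heq), hca]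
        simp only [Bool.false_eq_true, if_false]
        exact ih (i0 + 1) (by omega)
      · rw [if_pos heq]
        exact ih (i0 + 1) (by omega)

-- ===== VERDICT (by name: the statement is the Claim_ definition above) =====
theorem find_mirror_location_spec : Claim_equal_find_mirror_location := by
  intro lines _
  show find_mirror_location lines = find_mirror_location_alt lines
  have hrep : ∀ h, (List.replicate (lines.length + 1) (0 : Nat)).getD h 0 = 0 := by
    intro h
    rw [List.getD_eq_getElem?_getD, List.getElem?_replicate]
    split <;> rfl
  have halt : find_mirror_location_alt lines = pvScan lines 1 := by
    unfold find_mirror_location_alt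
    apply pvManLoop_eq_scan lines lines.length
    · omega
    · omega
    · intro h hh
      have : h = 0 := by omega
      subst this
      rw [hrep]
      exact ⟨⟨by simp [pvCap], fun j hj => absurd hj (by omega)⟩, Or.inl (by simp [pvCap])⟩
    · intro h _; exact hrep h
    · rw [List.length_replicate]
    · exact ⟨0, 0, rfl, rfl, le_refl _, by omega, by omega, fun j hj => absurd hj (by omega)⟩
  rw [halt]
  unfold find_mirror_location
  by_cases hn : lines.length = 0
  · have h0 : PySem.List.pyRange 0 ((lines.length : Int) - 1) 1 = [] := by
      rw [PySem.List.pyRange_one]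
      rw [show (((lines.length : Int) - 1) - 0).toNat = 0 from by omega]
      rfl
    rw [h0, pvScan, if_neg (by omega)]
    rfl
  · have e0 : (((lines.length : Int) - 1) - 0).toNat = lines.length - 1 := by omega
    have h0 : PySem.List.pyRange 0 ((lines.length : Int) - 1) 1 =
        (List.range' 0 (lines.length - 1)).map (fun i : Nat => (i : Int)) := by
      rw [PySem.List.pyRange_one, e0, List.range_eq_range']
      exact List.map_congr_left (fun k _ => by omega)
    rw [h0]
    exact pvLoopA_eq_scan lines (lines.length - 1) 0 (by omega)
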